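-- pv_equiv track=rewrite | github.com/digantkumar/Perfect_cube | Perfect_cube.py | first_cube_above
-- ===== SOURCE A (Python) =====
-- def is_cube(n):
--     is_perfect_cube = False
--     if n>=0:
--         num = n
--     else:
--         num = -n
--     for i in range(0,num+1):
--         cube = i*i*i
--         if cube == num:
--             is_perfect_cube = True
--             break
--     if is_perfect_cube:
--         return "True"
--     return "False"
--
-- def first_cube_above(n):
--     num = n + 1
--     new_cube = is_cube(num)
--     if new_cube == "True":
--         return num
--     else:
--         num = num + 1
--         new_cube = is_cube(num)
--         while new_cube != "True":
--             num = num + 1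
--             new_cube = is_cube(num)
--     return num
-- ===== SOURCE B (Python) =====
-- # Faster: instead of scanning every candidate and testing each by a full O(m) scan,
-- # compute the answer directly from the integer cube root (found by walking cube roots k).
--
-- def _icbrt(x):
--     # floor integer cube root of x >= 0, by walking k upward
--     k = 0
--     while (k + 1) ** 3 <= x:
--         k += 1
--     return k
--
-- def first_cube_above(n):
--     m = n + 1
--     if m <= 0:
--         k = _icbrt(-m)        # largest k with k^3 <= -m
--         return -(k ** 3)
--     k = _icbrt(m - 1) + 1     # smallest k with k^3 >= m
--     return k ** 3
-- ===== Notes on version B (the rewrite author's own statement) =====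
-- stated objective: faster
-- what changed: Instead of testing every successive candidate m by a full 0..|m| linear scan for a cube root, B computes the integer cube root once (walking roots k upward) and returns the neighbouring cube directly via a closed-form case split on the sign.
import Mathlib
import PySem

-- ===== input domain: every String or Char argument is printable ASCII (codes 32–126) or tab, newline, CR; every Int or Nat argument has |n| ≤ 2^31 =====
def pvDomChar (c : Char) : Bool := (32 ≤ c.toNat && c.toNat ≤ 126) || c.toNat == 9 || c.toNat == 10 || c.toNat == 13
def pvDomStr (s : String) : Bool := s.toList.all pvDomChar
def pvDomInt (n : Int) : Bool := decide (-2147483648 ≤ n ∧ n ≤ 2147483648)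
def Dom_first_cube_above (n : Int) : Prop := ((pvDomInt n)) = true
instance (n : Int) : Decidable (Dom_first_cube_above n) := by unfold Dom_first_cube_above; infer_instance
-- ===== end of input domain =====

-- B computes the answer directly from the integer cube root (walking cube roots k) instead of
-- A's scan of every candidate m with a full 0..|m| inner scan per candidate.

-- ===== PORT A =====
-- is_cube's `for i in range(0, num+1): … break` scan
def isCubeScan (num : Int) : List Int → Bool
  | [] => false
  | i :: rest => if i * i * i = num then true else isCubeScan num rest

def is_cube (n : Int) : String :=
  let num := if n ≥ 0 then n else -n
  if isCubeScan num (PySem.List.pyRange 0 (num + 1) 1) then "True" else "False"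

-- the next three lemmas are needed by fcaLoop's termination proof, so they stay above the ports
theorem isCubeScan_true_iff (num : Int) (l : List Int) :
    isCubeScan num l = true ↔ ∃ i ∈ l, i * i * i = num := by
  induction l with
  | nil => simp [isCubeScan]
  | cons i rest ih =>
    simp only [isCubeScan, List.mem_cons]
    split
    · rename_i h
      constructor
      · intro _; exact ⟨i, Or.inl rfl, h⟩
      · intro _; rfl
    · rename_i h
      rw [ih]
      constructor
      · rintro ⟨j, hj, hje⟩; exact ⟨j, Or.inr hj, hje⟩
      · rintro ⟨j, hj, hje⟩
        rcases hj with rfl | hj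
        · exact absurd hje h
        · exact ⟨j, hj, hje⟩

theorem pvExCubeGe (num : Int) : ∃ k : Nat, num ≤ (k : Int) ^ 3 := by
  refine ⟨num.toNat, ?_⟩
  rcases le_or_gt num 0 with h | h
  · exact h.trans (by positivity)
  · have h1 : num ≤ (num.toNat : Int) := by omega
    have h2 : (num.toNat : Int) ≤ (num.toNat : Int) ^ 3 := by
      have h3 : (1 : Int) ≤ (num.toNat : Int) := by omega
      calc (num.toNat : Int) = (num.toNat : Int) ^ 1 := (pow_one _).symm
        _ ≤ (num.toNat : Int) ^ 3 := pow_le_pow_right₀ h3 (by norm_num)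
    exact h1.trans h2

def pvTarget (num : Int) : Nat := Nat.find (pvExCubeGe num)

-- if is_cube says "False", num is no nonnegative cube
theorem pvNotCube {num : Int} (h : is_cube num ≠ "True") (k : Nat) : num ≠ (k : Int) ^ 3 := by
  intro hk
  apply h
  have hnn : 0 ≤ num := by rw [hk]; positivity
  have hk3 : (k : Int) ≤ (k : Int) ^ 3 := by
    rcases Nat.eq_zero_or_pos k with h0 | h1
    · simp [h0]
    · have h3 : (1 : Int) ≤ (k : Int) := by exact_mod_cast h1
      calc (k : Int) = (k : Int) ^ 1 := (pow_one _).symm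
        _ ≤ (k : Int) ^ 3 := pow_le_pow_right₀ h3 (by norm_num)
  have hscan : isCubeScan num (PySem.List.pyRange 0 (num + 1) 1) = true := by
    rw [isCubeScan_true_iff]
    refine ⟨(k : Int), PySem.List.mem_pyRange_one.mpr ⟨by positivity, by linarith⟩, ?_⟩
    rw [hk]; ring
  simp only [is_cube]
  rw [if_pos hnn, if_pos hscan]

def fcaLoop (num : Int) : Int :=
  if is_cube num = "True" then num else fcaLoop (num + 1)
termination_by ((pvTarget num : Int) ^ 3 - num).toNat
decreasing_by
  rename_i h
  have ht : num ≤ (pvTarget num : Int) ^ 3 := Nat.find_spec (pvExCubeGe num)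
  have hne : num ≠ (pvTarget num : Int) ^ 3 := pvNotCube h _
  have hlt : num < (pvTarget num : Int) ^ 3 := lt_of_le_of_ne ht hne
  have hle : pvTarget (num + 1) ≤ pvTarget num := Nat.find_le (by omega)
  have hspec : num + 1 ≤ ((pvTarget (num + 1) : Int)) ^ 3 := Nat.find_spec (pvExCubeGe (num + 1))
  have hcube : ((pvTarget (num + 1) : Int)) ^ 3 ≤ ((pvTarget num : Int)) ^ 3 :=
    pow_le_pow_left₀ (by positivity) (by exact_mod_cast hle) 3
  set A := ((pvTarget (num + 1) : Int)) ^ 3 with hA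
  set B := ((pvTarget num : Int)) ^ 3 with hB
  clear_value A B
  omega

def first_cube_above (n : Int) : Int :=
  let num := n + 1
  if is_cube num = "True" then num
  else fcaLoop (num + 1)

-- ===== PORT B =====
-- floor integer cube root of x by walking k upward: while (k+1)^3 <= x: k += 1
def icbrtLoop (x k : Int) : Int :=
  if (k + 1) ^ 3 ≤ x then icbrtLoop x (k + 1) else k
termination_by (x - k).toNat + (-k).toNat
decreasing_by
  rename_i h
  rcases le_or_gt 0 k with hk | hk
  · have h1 : k + 1 ≤ (k + 1) ^ 3 := by
      calc k + 1 = (k + 1) ^ 1 := (pow_one _).symm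
        _ ≤ (k + 1) ^ 3 := pow_le_pow_right₀ (by omega) (by norm_num)
    have h2 : k + 1 ≤ x := h1.trans h
    omega
  · omega

def icbrt (x : Int) : Int := icbrtLoop x 0

def first_cube_above_alt (n : Int) : Int :=
  let m := n + 1
  if m ≤ 0 then
    -(icbrt (-m)) ^ 3
  else
    (icbrt (m - 1) + 1) ^ 3

-- ===== PRECONDITION & SPEC =====
def Spec_first_cube_above (n : Int) (out : Int) : Prop := out = first_cube_above_alt n
instance (n : Int) (out : Int) : Decidable (Spec_first_cube_above n out) := by unfold Spec_first_cube_above; infer_instance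

-- ===== CLAIM (what is proved, stated in full; the proofs are below) =====
def Claim_equal_first_cube_above : Prop := ∀ (n : Int), Dom_first_cube_above n → Spec_first_cube_above n (first_cube_above n)

-- ===== LEMMAS AND PROOFS =====

-- is_cube m = "True"  ↔  |m| is the cube of a nonnegative integer
theorem is_cube_iff (m : Int) :
    is_cube m = "True" ↔ ∃ k : Int, 0 ≤ k ∧ k ^ 3 = (if 0 ≤ m then m else -m) := by
  have habs : (if m ≥ 0 then m else -m) = (if 0 ≤ m then m else -m) := rfl
  simp only [is_cube, habs]
  set a : Int := if 0 ≤ m then m else -m with ha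
  have hann : 0 ≤ a := by rw [ha]; split <;> omega
  constructor
  · intro h
    have hscan : isCubeScan a (PySem.List.pyRange 0 (a + 1) 1) = true := by
      by_contra hs
      rw [if_neg hs] at h
      exact absurd h (by decide)
    rcases (isCubeScan_true_iff _ _).mp hscan with ⟨i, hi, hie⟩
    rw [PySem.List.mem_pyRange_one] at hi
    exact ⟨i, hi.1, by rw [← hie]; ring⟩
  · rintro ⟨k, hk, hke⟩
    have hk3 : k ≤ k ^ 3 := by
      rcases eq_or_lt_of_le hk with rfl | h1
      · simp
      · calc k = k ^ 1 := (pow_one _).symm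
          _ ≤ k ^ 3 := pow_le_pow_right₀ (by omega) (by norm_num)
    have hscan : isCubeScan a (PySem.List.pyRange 0 (a + 1) 1) = true := by
      rw [isCubeScan_true_iff]
      exact ⟨k, PySem.List.mem_pyRange_one.mpr ⟨hk, by linarith⟩, by rw [← hke]; ring⟩
    rw [if_pos hscan]

-- fcaLoop num is the first cube-valued point ≥ num
theorem fcaLoop_spec (num : Int) :
    is_cube (fcaLoop num) = "True" ∧ num ≤ fcaLoop num ∧
      ∀ m, num ≤ m → m < fcaLoop num → is_cube m ≠ "True" := by
  induction num using fcaLoop.induct with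
  | case1 num h =>
    rw [fcaLoop, if_pos h]
    exact ⟨h, le_refl _, fun m h1 h2 _ => absurd h2 (by omega)⟩
  | case2 num h ih =>
    rw [fcaLoop, if_neg h]
    refine ⟨ih.1, by omega, fun m h1 h2 => ?_⟩
    rcases eq_or_lt_of_le h1 with rfl | h1'
    · exact h
    · exact ih.2.2 m (by omega) h2

-- icbrtLoop bracket: starting from 0 ≤ k with k^3 ≤ x, the result r satisfies r^3 ≤ x < (r+1)^3
theorem icbrtLoop_spec (x k : Int) (hk : 0 ≤ k) (h3 : k ^ 3 ≤ x) :
    0 ≤ icbrtLoop x k ∧ (icbrtLoop x k) ^ 3 ≤ x ∧ x < (icbrtLoop x k + 1) ^ 3 := by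
  induction k using icbrtLoop.induct x with
  | case1 k h ih =>
    rw [icbrtLoop, if_pos h]
    exact ih (by omega) h
  | case2 k h =>
    rw [icbrtLoop, if_neg h]
    exact ⟨hk, h3, by omega⟩

theorem icbrt_spec (x : Int) (hx : 0 ≤ x) :
    0 ≤ icbrt x ∧ (icbrt x) ^ 3 ≤ x ∧ x < (icbrt x + 1) ^ 3 := by
  have h := icbrtLoop_spec x 0 (le_refl 0) (by simpa using hx)
  simpa [icbrt] using h

-- B's result is a cube point ≥ n+1 with no cube point in between
theorem alt_spec (n : Int) :
    is_cube (first_cube_above_alt n) = "True" ∧ n + 1 ≤ first_cube_above_alt n ∧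
      ∀ m, n + 1 ≤ m → m < first_cube_above_alt n → is_cube m ≠ "True" := by
  simp only [first_cube_above_alt]
  rcases le_or_gt (n + 1) 0 with hm | hm
  · rw [if_pos hm]
    obtain ⟨ht0, ht1, ht2⟩ := icbrt_spec (-(n + 1)) (by omega)
    set t := icbrt (-(n + 1)) with htdef
    have h0 : 0 ≤ t ^ 3 := pow_nonneg ht0 3
    refine ⟨?_, by linarith, ?_⟩
    · rw [is_cube_iff]
      refine ⟨t, ht0, ?_⟩
      rcases eq_or_lt_of_le h0 with he | hl
      · rw [if_pos (by linarith)]; linarith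
      · rw [if_neg (by linarith)]; ring
    · intro m h1 h2 hc
      rcases (is_cube_iff m).mp hc with ⟨k, hk0, hke⟩
      have hmneg : m < 0 := by linarith
      rw [if_neg (by omega)] at hke
      have hgt : t ^ 3 < k ^ 3 := by linarith
      have hlt : k ^ 3 < (t + 1) ^ 3 := by linarith
      have h1' : t < k := (Odd.pow_lt_pow (by norm_num)).mp hgt
      have h2' : k < t + 1 := (Odd.pow_lt_pow (by norm_num)).mp hlt
      omega
  · rw [if_neg (by omega)]
    obtain ⟨ht0, ht1, ht2⟩ := icbrt_spec (n + 1 - 1) (by omega)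
    set t := icbrt (n + 1 - 1) with htdef
    refine ⟨?_, by linarith, ?_⟩
    · rw [is_cube_iff]
      exact ⟨t + 1, by omega, by rw [if_pos (by linarith)]⟩
    · intro m h1 h2 hc
      rcases (is_cube_iff m).mp hc with ⟨k, hk0, hke⟩
      rw [if_pos (by omega)] at hke
      have hgt : t ^ 3 < k ^ 3 := by linarith
      have hlt : k ^ 3 < (t + 1) ^ 3 := by linarith
      have h1' : t < k := (Odd.pow_lt_pow (by norm_num)).mp hgt
      have h2' : k < t + 1 := (Odd.pow_lt_pow (by norm_num)).mp hlt
      omega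

-- A's result is also such a point
theorem a_spec (n : Int) :
    is_cube (first_cube_above n) = "True" ∧ n + 1 ≤ first_cube_above n ∧
      ∀ m, n + 1 ≤ m → m < first_cube_above n → is_cube m ≠ "True" := by
  simp only [first_cube_above]
  split
  · rename_i h
    exact ⟨h, le_refl _, fun m h1 h2 _ => absurd h2 (by omega)⟩
  · rename_i h
    obtain ⟨hc, hge, hmin⟩ := fcaLoop_spec (n + 1 + 1)
    refine ⟨hc, by omega, fun m h1 h2 => ?_⟩
    rcases eq_or_lt_of_le h1 with rfl | h1'
    · exact h
    · exact hmin m (by omega) h2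

-- ===== VERDICT (by name: the statement is the Claim_ definition above) =====
theorem first_cube_above_spec : Claim_equal_first_cube_above := by
  intro n _
  unfold Spec_first_cube_above
  obtain ⟨hac, hage, hamin⟩ := a_spec n
  obtain ⟨hbc, hbge, hbmin⟩ := alt_spec n
  rcases lt_trichotomy (first_cube_above n) (first_cube_above_alt n) with h | h | h
  · exact absurd hac (hbmin _ hage h)
  · exact h
  · exact absurd hbc (hamin _ hbge h)
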